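-- pv_equiv track=rewrite | github.com/haolunc/ARC-RL | reference_solutions/solutions/d22278a0.py | transform
-- ===== SOURCE A (Python) =====
-- def transform(grid):
--
--     sources = []
--     for r, row in enumerate(grid):
--         for c, val in enumerate(row):
--             if val != 0:
--                 sources.append((r, c, val))
--
--     H = len(grid)
--     W = len(grid[0]) if H else 0
--     out = [[0 for _ in range(W)] for _ in range(H)]
--
--     for r in range(H):
--         for c in range(W):
--
--             dists = [abs(r - sr) + abs(c - sc) for (sr, sc, _) in sources]
--             min_d = min(dists)
--             nearest = [i for i, d in enumerate(dists) if d == min_d]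
--
--             if len(nearest) != 1:
--                 out[r][c] = 0
--                 continue
--
--             sr, sc, colour = sources[nearest[0]]
--
--             k = max(abs(r - sr), abs(c - sc))
--             out[r][c] = colour if (k % 2 == 0) else 0
--
--     return out
-- ===== SOURCE B (Python) =====
-- def transform(grid):
--     H = len(grid)
--     W = len(grid[0]) if H else 0
--     Wd = 0
--     for row in grid:
--         if len(row) > Wd:
--             Wd = len(row)
--
--     def bump(t):
--         return None if t is None else (t[0] + 1, t[1], t[2], t[3])
--
--     def merge(a, b):
--         if a is None:
--             return b
--         if b is None:
--             return a
--         if a[0] < b[0]: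
--             return a
--         if b[0] < a[0]:
--             return b
--         return (a[0], a[1], a[2], a[3] and b[3] and a[1] == b[1] and a[2] == b[2])
--
--     # forward pass: summary (dist, sr, sc, unique) of sources in the up-left cone
--     prev = [None] * Wd
--     fw = []
--     for r in range(H):
--         row = grid[r]
--         cur = []
--         left = None
--         for c in range(Wd):
--             v = row[c] if c < len(row) else 0
--             t = (0, r, c, True) if v != 0 else None
--             t = merge(merge(t, bump(prev[c])), bump(left))
--             cur.append(t)
--             left = t
--         fw.append(cur)
--         prev = cur
--
--     # backward pass: fold in sources below/right; st[r][c] becomes the global summary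
--     nxt = [None] * Wd
--     st = []
--     for r in range(H - 1, -1, -1):
--         frow = fw[r]
--         cur = [None] * Wd
--         right = None
--         for c in range(Wd - 1, -1, -1):
--             t = merge(merge(frow[c], bump(nxt[c])), bump(right))
--             cur[c] = t
--             right = t
--         st.append(cur)
--         nxt = cur
--     st.reverse()
--
--     out = []
--     for r, strow in enumerate(st):
--         orow = []
--         for c, t in enumerate(strow[:W]):
--             if t is not None and t[3]:
--                 _, sr, sc, _ = t
--                 val = grid[sr][sc]
--                 orow.append(val if max(abs(r - sr), abs(c - sc)) % 2 == 0 else 0)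
--             else:
--                 orow.append(0)
--         out.append(orow)
--     return out
-- ===== Notes on version B (the rewrite author's own statement) =====
-- stated objective: faster
-- what changed: A scans the whole source list for every cell (per-cell argmin over all sources); B runs a two-pass L1 distance transform: a forward and a backward sweep each propagate a per-cell summary (min distance, owner, uniqueness flag) from the neighbouring cells, so no cell ever looks at the source list.
import Mathlib
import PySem

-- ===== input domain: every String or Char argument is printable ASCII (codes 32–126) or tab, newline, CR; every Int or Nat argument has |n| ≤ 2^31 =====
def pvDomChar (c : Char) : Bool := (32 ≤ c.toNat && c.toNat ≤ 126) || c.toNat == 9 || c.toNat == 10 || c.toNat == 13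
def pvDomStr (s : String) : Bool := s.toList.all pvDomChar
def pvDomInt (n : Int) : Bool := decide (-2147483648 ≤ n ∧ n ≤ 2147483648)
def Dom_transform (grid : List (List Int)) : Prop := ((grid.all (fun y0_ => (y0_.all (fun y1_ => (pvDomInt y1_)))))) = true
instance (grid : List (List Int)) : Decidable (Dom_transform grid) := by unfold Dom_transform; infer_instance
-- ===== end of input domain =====

-- B replaces A's per-cell scan over the whole source list by a two-pass L1 distance transform
-- propagating a per-cell summary (min distance, owner, uniqueness) between neighbouring cells.

-- ===== PORT A =====
-- per-cell body of A's double loop: distance list, min, list of argmin indices, then the parity rule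
def cellA (sources : List (Int × Int × Int)) (r c : Int) : Int :=
  let dists := sources.map (fun s => |r - s.1| + |c - s.2.1|)
  match PySem.List.min? dists (fun d => d) with
  | none => 0   -- Python raises ValueError here (min of empty list); excluded by Pre_transform
  | some min_d =>
      let nearest := (PySem.List.enumerate dists).foldl
        (fun acc p => if p.2 = min_d then acc ++ [p.1] else acc) []
      if nearest.length ≠ 1 then 0
      else
        let s := PySem.List.pyGetD sources (PySem.List.pyGetD nearest 0 0) (0, 0, 0)
        if PySem.Int.mod (max |r - s.1| |c - s.2.1|) 2 = 0 then s.2.2 else 0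

def transform (grid : List (List Int)) : List (List Int) :=
  let sources := (PySem.List.enumerate grid).foldl (fun acc p =>
      (PySem.List.enumerate p.2).foldl (fun acc q =>
        if q.2 ≠ 0 then acc ++ [(p.1, q.1, q.2)] else acc) acc) []
  let H : Int := PySem.List.len grid
  let W : Int := if H ≠ 0 then PySem.List.len (PySem.List.pyGetD grid 0 []) else 0
  (PySem.List.pyRange 0 H 1).map (fun r =>
    (PySem.List.pyRange 0 W 1).map (fun c => cellA sources r c))

-- ===== PORT B =====
abbrev StB := Option (Int × Int × Int × Bool)

def bumpB (t : StB) : StB :=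
  match t with
  | none => none
  | some (d, sr, sc, u) => some (d + 1, sr, sc, u)

def mergeB (a b : StB) : StB :=
  match a, b with
  | none, b => b
  | a, none => a
  | some (d1, r1, c1, u1), some (d2, r2, c2, u2) =>
      if d1 < d2 then some (d1, r1, c1, u1)
      else if d2 < d1 then some (d2, r2, c2, u2)
      else some (d1, r1, c1, u1 && u2 && (r1 == r2) && (c1 == c2))

-- forward sweep over one row: left-to-right, reading the cell above (prev) and to the left
def fwRowB (row : List Int) (r : Int) : Int → StB → List StB → List StB
  | _, _, [] => []
  | c, left, p :: ps =>
      let v := PySem.List.pyGetD row c 0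
      let t := mergeB (mergeB (if v ≠ 0 then some (0, r, c, true) else none) (bumpB p)) (bumpB left)
      t :: fwRowB row r (c + 1) t ps

def fwGridB (r : Int) (prev : List StB) : List (List Int) → List (List StB)
  | [] => []
  | row :: rest =>
      let cur := fwRowB row r 0 none prev
      cur :: fwGridB (r + 1) cur rest

-- backward sweep over one row: right-to-left, reading the cell below (nxt) and to the right
def bwRowB : List StB → List StB → List StB
  | [], _ => []
  | f :: fs, ns =>
      let rest := bwRowB fs ns.tail
      let t := mergeB (mergeB f (bumpB (ns.headD none))) (bumpB (rest.headD none))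
      t :: rest

def bwGridB (Wd : Nat) : List (List StB) → List (List StB)
  | [] => []
  | frow :: rest =>
      let below := bwGridB Wd rest
      bwRowB frow (below.headD (List.replicate Wd none)) :: below

def emitB (grid : List (List Int)) (r c : Int) (t : StB) : Int :=
  match t with
  | some (_, sr, sc, true) =>
      let val := PySem.List.pyGetD (PySem.List.pyGetD grid sr []) sc 0
      if PySem.Int.mod (max |r - sr| |c - sc|) 2 = 0 then val else 0
  | _ => 0

def transform_alt (grid : List (List Int)) : List (List Int) :=
  let H : Int := PySem.List.len grid
  let W : Int := if H ≠ 0 then PySem.List.len (PySem.List.pyGetD grid 0 []) else 0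
  let Wd : Nat := grid.foldl (fun acc row => if row.length > acc then row.length else acc) 0
  let st := bwGridB Wd (fwGridB 0 (List.replicate Wd none) grid)
  (PySem.List.enumerate st).map (fun p =>
    (PySem.List.enumerate (PySem.List.slice p.2 none (some W))).map
      (fun q => emitB grid p.1 q.1 q.2))

-- ===== PRECONDITION & SPEC =====
-- Pre_ excludes exactly the inputs on which A raises ValueError (min of an empty sequence):
-- a grid with a non-empty first row but no non-zero cell anywhere.
def Pre_transform (grid : List (List Int)) : Prop :=
  grid = [] ∨ grid.headI = [] ∨ ∃ row ∈ grid, ∃ v ∈ row, v ≠ 0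
instance (grid : List (List Int)) : Decidable (Pre_transform grid) := by
  unfold Pre_transform; infer_instance
def pvWitness_transform : List (List Int) := [[1]]

def Spec_transform (grid : List (List Int)) (out : List (List Int)) : Prop := out = transform_alt grid
instance (grid : List (List Int)) (out : List (List Int)) : Decidable (Spec_transform grid out) := by unfold Spec_transform; infer_instance

-- ===== CLAIM (what is proved, stated in full; the proofs are below) =====
def Claim_equal_transform : Prop := ∀ (grid : List (List Int)), Dom_transform grid → Pre_transform grid → Spec_transform grid (transform grid)

-- ===== LEMMAS AND PROOFS =====

-- the per-cell summary relation: `t` summarizes the source set `S` under key `κ`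
-- (min key, a key-minimal member, and whether the key-argmin is unique)
def RepS (κ : Int × Int → Int) (S : Finset (Int × Int)) (t : StB) : Prop :=
  match t with
  | none => S = ∅
  | some (d, sr, sc, u) =>
      (∀ p ∈ S, d ≤ κ p) ∧ (sr, sc) ∈ S ∧ κ (sr, sc) = d ∧
      (u = true ↔ (S.filter (fun p => κ p = d)).card = 1)

theorem repS_congr {κ1 κ2 : Int × Int → Int} {S : Finset (Int × Int)} {t : StB}
    (h : ∀ p ∈ S, κ1 p = κ2 p) (hr : RepS κ1 S t) : RepS κ2 S t := by
  cases t with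
  | none => exact hr
  | some q =>
      obtain ⟨d, sr, sc, u⟩ := q
      obtain ⟨hb, hm, hk, hu⟩ := hr
      refine ⟨fun p hp => (h p hp) ▸ hb p hp, hm, (h _ hm) ▸ hk, ?_⟩
      have : (S.filter (fun p => κ2 p = d)) = (S.filter (fun p => κ1 p = d)) :=
        Finset.filter_congr (fun p hp => by rw [h p hp])
      rw [this]; exact hu

theorem repS_bump {κ : Int × Int → Int} {S : Finset (Int × Int)} {t : StB}
    (hr : RepS κ S t) : RepS (fun p => κ p + 1) S (bumpB t) := by
  cases t with
  | none => exact hr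
  | some q =>
      obtain ⟨d, sr, sc, u⟩ := q
      obtain ⟨hb, hm, hk, hu⟩ := hr
      refine ⟨fun p hp => by have := hb p hp; show d + 1 ≤ κ p + 1; omega, hm,
        by show κ (sr, sc) + 1 = d + 1; omega, ?_⟩
      have : (S.filter (fun p => κ p + 1 = d + 1)) = (S.filter (fun p => κ p = d)) :=
        Finset.filter_congr (fun p _ => by constructor <;> (intro; omega))
      rw [this]; exact hu

def mergeKey (κ1 κ2 : Int × Int → Int) (S1 S2 : Finset (Int × Int)) (p : Int × Int) : Int :=
  if p ∈ S1 then (if p ∈ S2 then min (κ1 p) (κ2 p) else κ1 p) else κ2 p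

theorem repS_merge {κ1 κ2 : Int × Int → Int} {S1 S2 : Finset (Int × Int)} {t1 t2 : StB}
    (h1 : RepS κ1 S1 t1) (h2 : RepS κ2 S2 t2) :
    RepS (mergeKey κ1 κ2 S1 S2) (S1 ∪ S2) (mergeB t1 t2) := by
  cases t1 with
  | none =>
      have hS1 : S1 = ∅ := h1
      subst hS1
      have : mergeB none t2 = t2 := by cases t2 <;> rfl
      rw [this, Finset.empty_union]
      exact repS_congr (fun p hp => by simp [mergeKey]) h2
  | some q1 =>
      obtain ⟨d1, r1, c1, u1⟩ := q1
      cases t2 with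
      | none =>
          have hS2 : S2 = ∅ := h2
          subst hS2
          rw [show mergeB (some (d1, r1, c1, u1)) none = some (d1, r1, c1, u1) from rfl,
            Finset.union_empty]
          exact repS_congr (fun p hp => by simp [mergeKey, hp]) h1
      | some q2 =>
          obtain ⟨d2, r2, c2, u2⟩ := q2
          obtain ⟨hb1, hm1, hk1, hu1⟩ := h1
          obtain ⟨hb2, hm2, hk2, hu2⟩ := h2
          have hκm : ∀ p, p ∈ S1 ∪ S2 → min d1 d2 ≤ mergeKey κ1 κ2 S1 S2 p := by
            intro p hp
            rcases Finset.mem_union.mp hp with hp1 | hp2 <;>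
              by_cases hq1 : p ∈ S1 <;> by_cases hq2 : p ∈ S2 <;>
              simp only [mergeKey, hq1, hq2, if_true, if_false] <;>
              first
                | (have := hb1 p (by assumption); have := hb2 p (by assumption); omega)
                | (have := hb1 p (by assumption); omega)
                | (have := hb2 p (by assumption); omega)
                | (exact absurd hp1 hq1)
          rcases lt_trichotomy d1 d2 with hlt | heq | hgt
          · -- d1 < d2 : result is t1
            rw [show mergeB (some (d1, r1, c1, u1)) (some (d2, r2, c2, u2))
                = some (d1, r1, c1, u1) by simp [mergeB, hlt]]
            have hk1' : mergeKey κ1 κ2 S1 S2 (r1, c1) = d1 := by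
              by_cases hq2 : (r1, c1) ∈ S2 <;>
                simp only [mergeKey, hm1, hq2, if_true, if_false]
              · have := hb2 _ hq2; omega
              · exact hk1
            refine ⟨fun p hp => by have := hκm p hp; omega,
              Finset.mem_union_left _ hm1, hk1', ?_⟩
            have hfe : ((S1 ∪ S2).filter (fun p => mergeKey κ1 κ2 S1 S2 p = d1))
                = S1.filter (fun p => κ1 p = d1) := by
              ext p
              simp only [Finset.mem_filter, Finset.mem_union]
              constructor
              · rintro ⟨hp, hkp⟩
                by_cases hq1 : p ∈ S1 <;> by_cases hq2 : p ∈ S2 <;>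
                  simp only [mergeKey, hq1, hq2, if_true, if_false] at hkp <;>
                  [skip; skip; skip; skip]
                · exact ⟨hq1, by have := hb2 p hq2; omega⟩
                · exact ⟨hq1, hkp⟩
                · exact absurd (by have := hb2 p hq2; omega : (d2:Int) ≤ d1) (by omega)
                · rcases hp with h | h; exact absurd h hq1; exact absurd h hq2
              · rintro ⟨hp, hkp⟩
                refine ⟨Or.inl hp, ?_⟩
                by_cases hq2 : p ∈ S2 <;>
                  simp only [mergeKey, hp, hq2, if_true, if_false]
                · have := hb2 p hq2; omega
                · exact hkp
            rw [hfe]; exact hu1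
          · -- d1 = d2 : merged flag
            subst heq
            rw [show mergeB (some (d1, r1, c1, u1)) (some (d1, r2, c2, u2))
                = some (d1, r1, c1, u1 && u2 && (r1 == r2) && (c1 == c2)) by
                  simp [mergeB]]
            have hk1' : mergeKey κ1 κ2 S1 S2 (r1, c1) = d1 := by
              by_cases hq2 : (r1, c1) ∈ S2 <;>
                simp only [mergeKey, hm1, hq2, if_true, if_false]
              · have := hb2 _ hq2; omega
              · exact hk1
            refine ⟨fun p hp => by have := hκm p hp; omega,
              Finset.mem_union_left _ hm1, hk1', ?_⟩
            have hfe : ((S1 ∪ S2).filter (fun p => mergeKey κ1 κ2 S1 S2 p = d1))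
                = S1.filter (fun p => κ1 p = d1) ∪ S2.filter (fun p => κ2 p = d1) := by
              ext p
              simp only [Finset.mem_filter, Finset.mem_union]
              constructor
              · rintro ⟨hp, hkp⟩
                by_cases hq1 : p ∈ S1 <;> by_cases hq2 : p ∈ S2 <;>
                  simp only [mergeKey, hq1, hq2, if_true, if_false] at hkp
                · have hb1' := hb1 p hq1; have hb2' := hb2 p hq2
                  rcases le_total (κ1 p) (κ2 p) with hle | hle
                  · exact Or.inl ⟨hq1, by omega⟩
                  · exact Or.inr ⟨hq2, by omega⟩
                · exact Or.inl ⟨hq1, hkp⟩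
                · exact Or.inr ⟨hq2, hkp⟩
                · rcases hp with h | h; exact absurd h hq1; exact absurd h hq2
              · rintro (⟨hp, hkp⟩ | ⟨hp, hkp⟩)
                · refine ⟨Or.inl hp, ?_⟩
                  by_cases hq2 : p ∈ S2 <;>
                    simp only [mergeKey, hp, hq2, if_true, if_false]
                  · have := hb2 p hq2; omega
                  · exact hkp
                · refine ⟨Or.inr hp, ?_⟩
                  by_cases hq1 : p ∈ S1 <;>
                    simp only [mergeKey, hq1, hp, if_true, if_false]
                  · have := hb1 p hq1; omega
                  · exact hkp
            rw [hfe]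
            have hmem1 : (r1, c1) ∈ S1.filter (fun p => κ1 p = d1) :=
              Finset.mem_filter.mpr ⟨hm1, hk1⟩
            have hmem2 : (r2, c2) ∈ S2.filter (fun p => κ2 p = d1) :=
              Finset.mem_filter.mpr ⟨hm2, hk2⟩
            constructor
            · intro hu
              simp only [Bool.and_eq_true, beq_iff_eq] at hu
              obtain ⟨⟨⟨hu1', hu2'⟩, hre⟩, hce⟩ := hu
              have e1 := Finset.card_eq_one.mp (hu1.mp hu1')
              have e2 := Finset.card_eq_one.mp (hu2.mp hu2')
              obtain ⟨a1, ha1⟩ := e1; obtain ⟨a2, ha2⟩ := e2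
              rw [ha1] at hmem1; rw [ha2] at hmem2
              have hx1 : a1 = (r1, c1) := (Finset.mem_singleton.mp hmem1).symm
              have hx2 : a2 = (r2, c2) := (Finset.mem_singleton.mp hmem2).symm
              rw [ha1, ha2, hx1, hx2, hre, hce]
              simp
            · intro hcard
              obtain ⟨a, ha⟩ := Finset.card_eq_one.mp hcard
              have hsub1 : S1.filter (fun p => κ1 p = d1) ⊆ {a} := by
                rw [← ha]; exact Finset.subset_union_left
              have hsub2 : S2.filter (fun p => κ2 p = d1) ⊆ {a} := by
                rw [← ha]; exact Finset.subset_union_right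
              have hx1 : (r1, c1) = a := Finset.mem_singleton.mp (hsub1 hmem1)
              have hx2 : (r2, c2) = a := Finset.mem_singleton.mp (hsub2 hmem2)
              have hs1 : S1.filter (fun p => κ1 p = d1) = {a} :=
                Finset.Subset.antisymm hsub1 (Finset.singleton_subset_iff.mpr (hx1 ▸ hmem1))
              have hs2 : S2.filter (fun p => κ2 p = d1) = {a} :=
                Finset.Subset.antisymm hsub2 (Finset.singleton_subset_iff.mpr (hx2 ▸ hmem2))
              have : r1 = r2 ∧ c1 = c2 := by
                have := hx1.trans hx2.symm
                exact ⟨congrArg Prod.fst this, congrArg Prod.snd this⟩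
              simp only [Bool.and_eq_true, beq_iff_eq]
              exact ⟨⟨⟨hu1.mpr (by rw [hs1]; simp), hu2.mpr (by rw [hs2]; simp)⟩, this.1⟩, this.2⟩
          · -- d2 < d1 : result is t2
            rw [show mergeB (some (d1, r1, c1, u1)) (some (d2, r2, c2, u2))
                = some (d2, r2, c2, u2) by simp [mergeB, hgt, not_lt_of_gt hgt]]
            have hk2' : mergeKey κ1 κ2 S1 S2 (r2, c2) = d2 := by
              by_cases hq1 : (r2, c2) ∈ S1 <;>
                simp only [mergeKey, hq1, hm2, if_true, if_false]
              · have := hb1 _ hq1; omega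
              · exact hk2
            refine ⟨fun p hp => by have := hκm p hp; omega,
              Finset.mem_union_right _ hm2, hk2', ?_⟩
            have hfe : ((S1 ∪ S2).filter (fun p => mergeKey κ1 κ2 S1 S2 p = d2))
                = S2.filter (fun p => κ2 p = d2) := by
              ext p
              simp only [Finset.mem_filter, Finset.mem_union]
              constructor
              · rintro ⟨hp, hkp⟩
                by_cases hq1 : p ∈ S1 <;> by_cases hq2 : p ∈ S2 <;>
                  simp only [mergeKey, hq1, hq2, if_true, if_false] at hkp
                · have := hb1 p hq1; have := hb2 p hq2
                  exact ⟨hq2, by omega⟩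
                · exact absurd (by have := hb1 p hq1; omega : (d1:Int) ≤ d2) (by omega)
                · exact ⟨hq2, hkp⟩
                · rcases hp with h | h; exact absurd h hq1; exact absurd h hq2
              · rintro ⟨hp, hkp⟩
                refine ⟨Or.inr hp, ?_⟩
                by_cases hq1 : p ∈ S1 <;>
                  simp only [mergeKey, hq1, hp, if_true, if_false]
                · have := hb1 p hq1; omega
                · exact hkp
            rw [hfe]; exact hu2

theorem repS_merge3 {κ κ1 κ2 κ3 : Int × Int → Int} {S1 S2 S3 : Finset (Int × Int)}
    {t1 t2 t3 : StB}
    (h1 : RepS κ1 S1 t1) (h2 : RepS κ2 S2 t2) (h3 : RepS κ3 S3 t3)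
    (hge1 : ∀ p ∈ S1, κ p ≤ κ1 p) (hge2 : ∀ p ∈ S2, κ p ≤ κ2 p)
    (hge3 : ∀ p ∈ S3, κ p ≤ κ3 p)
    (hat : ∀ p ∈ S1 ∪ S2 ∪ S3,
      (p ∈ S1 ∧ κ1 p = κ p) ∨ (p ∈ S2 ∧ κ2 p = κ p) ∨ (p ∈ S3 ∧ κ3 p = κ p)) :
    RepS κ (S1 ∪ S2 ∪ S3) (mergeB (mergeB t1 t2) t3) := by
  have h123 := repS_merge (repS_merge h1 h2) h3
  refine repS_congr (fun p hp => ?_) h123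
  have hat' := hat p hp
  by_cases m1 : p ∈ S1 <;> by_cases m2 : p ∈ S2 <;> by_cases m3 : p ∈ S3 <;>
    simp only [mergeKey, Finset.mem_union, m1, m2, m3, or_true, or_false,
      if_true, if_false] <;>
    rcases hat' with ⟨hm, he⟩ | ⟨hm, he⟩ | ⟨hm, he⟩ <;>
      (try exact absurd hm (by assumption)) <;>
      (try have g1 := hge1 p m1) <;> (try have g2 := hge2 p m2) <;>
      (try have g3 := hge3 p m3) <;> omega

-- ===== grid-level spec objects =====
def srcsOf (grid : List (List Int)) : List (Int × Int × Int) :=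
  (PySem.List.enumerate grid).flatMap (fun p =>
    ((PySem.List.enumerate p.2).filter (fun q => decide (q.2 ≠ 0))).map (fun q => (p.1, q.1, q.2)))

def posF (grid : List (List Int)) : Finset (Int × Int) :=
  ((srcsOf grid).map (fun s => (s.1, s.2.1))).toFinset

def manh (r c : Int) (p : Int × Int) : Int := |r - p.1| + |c - p.2|

def coneF (grid : List (List Int)) (r c : Int) : Finset (Int × Int) :=
  (posF grid).filter (fun p => p.1 ≤ r ∧ p.2 ≤ c)

theorem mem_srcsOf {grid : List (List Int)} {s : Int × Int × Int} :
    s ∈ srcsOf grid ↔ ∃ (i j : Nat), ∃ (hi : i < grid.length) (hj : j < grid[i].length),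
      grid[i][j] ≠ 0 ∧ s = ((i : Int), (j : Int), grid[i][j]) := by
  simp only [srcsOf, List.mem_flatMap, List.mem_map, List.mem_filter,
    PySem.List.mem_enumerate_iff]
  constructor
  · rintro ⟨p, ⟨k, hk, rfl⟩, q, ⟨⟨k2, hk2, rfl⟩, hne⟩, rfl⟩
    simp only [zero_add] at *
    exact ⟨k, k2, hk, hk2, by simpa using hne, rfl⟩
  · rintro ⟨i, j, hi, hj, hne, rfl⟩
    exact ⟨((i : Int), grid[i]), ⟨i, hi, by simp⟩,
      ((j : Int), grid[i][j]), ⟨⟨j, hj, by simp⟩, by simpa using hne⟩, rfl⟩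

def wdOf (grid : List (List Int)) : Nat :=
  grid.foldl (fun acc row => if row.length > acc then row.length else acc) 0

theorem le_wdOf {grid : List (List Int)} {row : List Int} (h : row ∈ grid) :
    row.length ≤ wdOf grid := by
  have key : ∀ (l : List (List Int)) (a : Nat),
      a ≤ l.foldl (fun acc row => if row.length > acc then row.length else acc) a ∧
      ∀ r ∈ l, r.length ≤ l.foldl (fun acc row => if row.length > acc then row.length else acc) a := by
    intro l
    induction l with
    | nil => exact fun a => ⟨le_refl _, by simp⟩
    | cons x t ih =>
        intro a
        simp only [List.foldl_cons, List.mem_cons]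
        constructor
        · exact le_trans (by split <;> omega) (ih _).1
        · rintro r (rfl | hr)
          · exact le_trans (by split <;> omega) (ih _).1
          · exact (ih _).2 r hr
  exact (key grid 0).2 row h

theorem mem_posF {grid : List (List Int)} {p : Int × Int} :
    p ∈ posF grid ↔ ∃ (i j : Nat), ∃ (hi : i < grid.length) (hj : j < grid[i].length),
      grid[i][j] ≠ 0 ∧ p = ((i : Int), (j : Int)) := by
  simp only [posF, List.mem_toFinset, List.mem_map]
  constructor
  · rintro ⟨s, hs, rfl⟩
    obtain ⟨i, j, hi, hj, hne, rfl⟩ := mem_srcsOf.mp hs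
    exact ⟨i, j, hi, hj, hne, rfl⟩
  · rintro ⟨i, j, hi, hj, hne, rfl⟩
    exact ⟨((i : Int), (j : Int), grid[i][j]), mem_srcsOf.mpr ⟨i, j, hi, hj, hne, rfl⟩, rfl⟩

theorem posF_bounds {grid : List (List Int)} {p : Int × Int} (h : p ∈ posF grid) :
    0 ≤ p.1 ∧ p.1 < (grid.length : Int) ∧ 0 ≤ p.2 ∧ p.2 < (wdOf grid : Int) ∧
      p.2 < ((grid[p.1.toNat]?.getD []).length : Int) := by
  obtain ⟨i, j, hi, hj, hne, rfl⟩ := mem_posF.mp h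
  have hw : grid[i].length ≤ wdOf grid := le_wdOf (List.getElem_mem hi)
  have : ((i : Int)).toNat = i := by omega
  rw [this, List.getElem?_eq_getElem hi]
  simp only [Option.getD_some]
  constructor; · positivity
  constructor; · exact_mod_cast hi
  constructor; · positivity
  constructor; · exact_mod_cast lt_of_lt_of_le hj hw
  · exact_mod_cast hj

-- Manhattan-distance step identities (one cell up/left/down/right)
theorem manh_up {r c : Int} {p : Int × Int} (h : p.1 ≤ r - 1) :
    manh r c p = manh (r - 1) c p + 1 := by
  simp only [manh, Int.abs_eq_natAbs]; omega

theorem manh_left {r c : Int} {p : Int × Int} (h : p.2 ≤ c - 1) :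
    manh r c p = manh r (c - 1) p + 1 := by
  simp only [manh, Int.abs_eq_natAbs]; omega

theorem manh_down_le {r c : Int} {p : Int × Int} :
    manh r c p ≤ manh (r + 1) c p + 1 := by
  simp only [manh, Int.abs_eq_natAbs]; omega

theorem manh_down_eq {r c : Int} {p : Int × Int} (h : r + 1 ≤ p.1) :
    manh (r + 1) c p + 1 = manh r c p := by
  simp only [manh, Int.abs_eq_natAbs]; omega

theorem manh_right_le {r c : Int} {p : Int × Int} :
    manh r c p ≤ manh r (c + 1) p + 1 := by
  simp only [manh, Int.abs_eq_natAbs]; omega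

theorem manh_right_eq {r c : Int} {p : Int × Int} (h : c + 1 ≤ p.2) :
    manh r (c + 1) p + 1 = manh r c p := by
  simp only [manh, Int.abs_eq_natAbs]; omega

theorem repS_merge3_exact {κ : Int × Int → Int} {S1 S2 S3 : Finset (Int × Int)}
    {t1 t2 t3 : StB} (h1 : RepS κ S1 t1) (h2 : RepS κ S2 t2) (h3 : RepS κ S3 t3) :
    RepS κ (S1 ∪ S2 ∪ S3) (mergeB (mergeB t1 t2) t3) := by
  refine repS_merge3 h1 h2 h3 (fun p _ => le_refl _) (fun p _ => le_refl _)
    (fun p _ => le_refl _) (fun p hp => ?_)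
  rcases Finset.mem_union.mp hp with hp' | hp'
  · rcases Finset.mem_union.mp hp' with hp'' | hp''
    · exact Or.inl ⟨hp'', rfl⟩
    · exact Or.inr (Or.inl ⟨hp'', rfl⟩)
  · exact Or.inr (Or.inr ⟨hp', rfl⟩)

theorem cone_neg_col {grid : List (List Int)} {r c : Int} (h : c < 0) :
    coneF grid r c = ∅ := by
  rw [Finset.eq_empty_iff_forall_notMem]
  intro p hp
  obtain ⟨hm, _, h2⟩ := Finset.mem_filter.mp hp
  have := (posF_bounds hm).2.2.1
  omega

theorem cone_neg_row {grid : List (List Int)} {r c : Int} (h : r < 0) :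
    coneF grid r c = ∅ := by
  rw [Finset.eq_empty_iff_forall_notMem]
  intro p hp
  obtain ⟨hm, h1, _⟩ := Finset.mem_filter.mp hp
  have := (posF_bounds hm).1
  omega

theorem rep_none_empty (κ : Int × Int → Int) : RepS κ (∅ : Finset (Int × Int)) none := rfl

theorem rep_self (grid : List (List Int)) (i j : Nat) (hi : i < grid.length) :
    RepS (manh (i : Int) (j : Int))
      ((posF grid).filter (fun q => q = ((i : Int), (j : Int))))
      (if PySem.List.pyGetD grid[i] (j : Int) 0 ≠ 0
        then some (0, (i : Int), (j : Int), true) else none) := by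
  have hget : PySem.List.pyGetD grid[i] (j : Int) 0 = grid[i].getD j 0 :=
    PySem.List.pyGetD_natCast _ _ _
  by_cases h : PySem.List.pyGetD grid[i] (j : Int) 0 ≠ 0
  · rw [if_pos h]
    have hj : j < grid[i].length := by
      by_contra hj
      rw [hget, List.getD_eq_getElem?_getD, List.getElem?_eq_none (by omega)] at h
      exact h rfl
    have hval : grid[i][j] ≠ 0 := by
      rwa [hget, List.getD_eq_getElem?_getD, List.getElem?_eq_getElem hj] at h
    have hmem : ((i : Int), (j : Int)) ∈ posF grid :=
      mem_posF.mpr ⟨i, j, hi, hj, hval, rfl⟩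
    have hset : (posF grid).filter (fun q => q = ((i : Int), (j : Int)))
        = {((i : Int), (j : Int))} := by
      rw [Finset.filter_eq']
      exact if_pos hmem
    rw [hset]
    have hk : manh (i : Int) (j : Int) ((i : Int), (j : Int)) = 0 := by
      simp [manh]
    refine ⟨fun p hp => ?_, Finset.mem_singleton_self _, hk, ?_⟩
    · rw [Finset.mem_singleton.mp hp, hk]
    · have : ({((i : Int), (j : Int))} : Finset (Int × Int)).filter
          (fun p => manh (i : Int) (j : Int) p = 0) = {((i : Int), (j : Int))} := by
        rw [Finset.filter_eq_self]
        intro p hp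
        rw [Finset.mem_singleton.mp hp]; exact hk
      rw [this]; simp
  · rw [if_neg h]
    rw [ne_eq, not_not] at h
    have hset : (posF grid).filter (fun q => q = ((i : Int), (j : Int))) = ∅ := by
      rw [Finset.filter_eq']
      rw [if_neg]
      intro hmem
      obtain ⟨i', j', hi', hj', hval, he⟩ := mem_posF.mp hmem
      have : i' = i ∧ j' = j := by
        have h1 := congrArg Prod.fst he
        have h2 := congrArg Prod.snd he
        simp only at h1 h2
        omega
      obtain ⟨rfl, rfl⟩ := this
      rw [hget, List.getD_eq_getElem?_getD, List.getElem?_eq_getElem hj'] at h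
      exact hval h
    rw [hset]
    exact rep_none_empty _

-- one forward-sweep cell
theorem fw_cell (grid : List (List Int)) (i j : Nat) (hi : i < grid.length)
    {up left : StB}
    (hup : RepS (manh ((i : Int) - 1) (j : Int)) (coneF grid ((i : Int) - 1) (j : Int)) up)
    (hleft : RepS (manh (i : Int) ((j : Int) - 1)) (coneF grid (i : Int) ((j : Int) - 1)) left) :
    RepS (manh (i : Int) (j : Int)) (coneF grid (i : Int) (j : Int))
      (mergeB (mergeB
        (if PySem.List.pyGetD grid[i] (j : Int) 0 ≠ 0
          then some (0, (i : Int), (j : Int), true) else none)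
        (bumpB up)) (bumpB left)) := by
  have h1 := rep_self grid i j hi
  have h2 : RepS (manh (i : Int) (j : Int)) (coneF grid ((i : Int) - 1) (j : Int)) (bumpB up) := by
    refine repS_congr (fun p hp => ?_) (repS_bump hup)
    have hple := (Finset.mem_filter.mp hp).2.1
    exact (manh_up hple).symm
  have h3 : RepS (manh (i : Int) (j : Int)) (coneF grid (i : Int) ((j : Int) - 1)) (bumpB left) := by
    refine repS_congr (fun p hp => ?_) (repS_bump hleft)
    have hple := (Finset.mem_filter.mp hp).2.2
    exact (manh_left hple).symm
  have hm := repS_merge3_exact h1 h2 h3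
  have hset : (posF grid).filter (fun q => q = ((i : Int), (j : Int)))
      ∪ coneF grid ((i : Int) - 1) (j : Int) ∪ coneF grid (i : Int) ((j : Int) - 1)
      = coneF grid (i : Int) (j : Int) := by
    ext p
    simp only [Finset.mem_union, Finset.mem_filter, coneF]
    constructor
    · rintro ((⟨hm', he⟩ | ⟨hm', h1', h2'⟩) | ⟨hm', h1', h2'⟩)
      · subst he; exact ⟨hm', le_refl _, le_refl _⟩
      · exact ⟨hm', by omega, h2'⟩
      · exact ⟨hm', h1', by omega⟩
    · rintro ⟨hm', h1', h2'⟩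
      by_cases hr : p.1 ≤ (i : Int) - 1
      · exact Or.inl (Or.inr ⟨hm', hr, h2'⟩)
      · by_cases hc : p.2 ≤ (j : Int) - 1
        · exact Or.inr ⟨hm', h1', hc⟩
        · refine Or.inl (Or.inl ⟨hm', ?_⟩)
          have : p.1 = (i : Int) ∧ p.2 = (j : Int) := by omega
          exact Prod.ext this.1 this.2
  rwa [hset] at hm

theorem fwRowB_length (row : List Int) (r : Int) :
    ∀ (prev : List StB) (c : Int) (left : StB),
      (fwRowB row r c left prev).length = prev.length := by
  intro prev
  induction prev with
  | nil => intro c left; rfl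
  | cons p ps ih => intro c left; simp [fwRowB, ih]

theorem fwRow_rep (grid : List (List Int)) (i : Nat) (hi : i < grid.length) :
    ∀ (prev : List StB) (j : Nat) (left : StB),
      (∀ (k : Nat), k < prev.length →
          RepS (manh ((i : Int) - 1) ((j + k : Nat) : Int))
            (coneF grid ((i : Int) - 1) ((j + k : Nat) : Int)) (prev.getD k none)) →
      RepS (manh (i : Int) ((j : Int) - 1)) (coneF grid (i : Int) ((j : Int) - 1)) left →
      ∀ (k : Nat), k < prev.length →
          RepS (manh (i : Int) ((j + k : Nat) : Int))
            (coneF grid (i : Int) ((j + k : Nat) : Int))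
            ((fwRowB grid[i] (i : Int) (j : Int) left prev).getD k none) := by
  intro prev
  induction prev with
  | nil => intro j left _ _ k hk; exact absurd hk (by simp)
  | cons p ps ih =>
      intro j left hprev hleft k hk
      have hstep : RepS (manh (i : Int) (j : Int)) (coneF grid (i : Int) (j : Int))
          (mergeB (mergeB
            (if PySem.List.pyGetD grid[i] (j : Int) 0 ≠ 0
              then some (0, (i : Int), (j : Int), true) else none)
            (bumpB p)) (bumpB left)) := by
        have h0 := hprev 0 (by simp)
        simp only [Nat.add_zero, List.getD_cons_zero] at h0
        exact fw_cell grid i j hi h0 hleft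
      match k with
      | 0 =>
          simpa only [Nat.add_zero, fwRowB, List.getD_cons_zero] using hstep
      | Nat.succ k' =>
          have hprev' : ∀ (k : Nat), k < ps.length →
              RepS (manh ((i : Int) - 1) (((j + 1) + k : Nat) : Int))
                (coneF grid ((i : Int) - 1) (((j + 1) + k : Nat) : Int)) (ps.getD k none) := by
            intro k2 hk2
            have := hprev (k2 + 1) (by simp; omega)
            simpa only [List.getD_cons_succ, show j + (k2 + 1) = j + 1 + k2 by omega] using this
          have hleft' : RepS (manh (i : Int) (((j + 1 : Nat) : Int) - 1))
              (coneF grid (i : Int) (((j + 1 : Nat) : Int) - 1))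
              (mergeB (mergeB
                (if PySem.List.pyGetD grid[i] (j : Int) 0 ≠ 0
                  then some (0, (i : Int), (j : Int), true) else none)
                (bumpB p)) (bumpB left)) := by
            have he : ((j + 1 : Nat) : Int) - 1 = (j : Int) := by push_cast; ring
            rw [he]
            exact hstep
          have := ih (j + 1) _ hprev' hleft' k' (by simpa using hk)
          have hcast : ((j + 1 + k' : Nat) : Int) = ((j + (k' + 1) : Nat) : Int) := by
            push_cast; ring
          rw [hcast] at this
          have hfw : fwRowB grid[i] (i : Int) (j : Int) left (p :: ps)
              = (mergeB (mergeB
                  (if PySem.List.pyGetD grid[i] (j : Int) 0 ≠ 0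
                    then some (0, (i : Int), (j : Int), true) else none)
                  (bumpB p)) (bumpB left))
                :: fwRowB grid[i] (i : Int) ((j : Int) + 1) (mergeB (mergeB
                  (if PySem.List.pyGetD grid[i] (j : Int) 0 ≠ 0
                    then some (0, (i : Int), (j : Int), true) else none)
                  (bumpB p)) (bumpB left)) ps := rfl
          rw [hfw, List.getD_cons_succ]
          have hc1 : ((j : Int) + 1) = ((j + 1 : Nat) : Int) := by push_cast; ring
          rw [hc1]
          exact this

theorem fwGrid_rep (grid : List (List Int)) :
    ∀ (rest : List (List Int)) (i : Nat) (prev : List StB),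
      grid.drop i = rest →
      prev.length = wdOf grid →
      (∀ k : Nat, k < wdOf grid →
          RepS (manh ((i : Int) - 1) (k : Int)) (coneF grid ((i : Int) - 1) (k : Int))
            (prev.getD k none)) →
      (fwGridB (i : Int) prev rest).length = rest.length ∧
      ∀ m : Nat, m < rest.length →
        (((fwGridB (i : Int) prev rest).getD m []).length = wdOf grid ∧
         ∀ k : Nat, k < wdOf grid →
           RepS (manh ((i + m : Nat) : Int) (k : Int)) (coneF grid ((i + m : Nat) : Int) (k : Int))
             (((fwGridB (i : Int) prev rest).getD m []).getD k none)) := by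
  intro rest
  induction rest with
  | nil => intro i prev _ _ _; exact ⟨rfl, fun m hm => absurd hm (by simp)⟩
  | cons row rest' ih =>
      intro i prev hdrop hlen hprev
      have hi : i < grid.length := by
        by_contra hij
        rw [List.drop_eq_nil_of_le (by omega)] at hdrop
        exact List.cons_ne_nil _ _ hdrop.symm
      have hrow : row = grid[i] := by
        have := List.getElem_cons_drop hi
        rw [hdrop] at this
        exact (List.cons_eq_cons.mp this.symm).1
      have hrest' : grid.drop (i + 1) = rest' := by
        have h2 : (List.drop i grid).tail = List.drop (i + 1) grid := List.tail_drop ..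
        rw [hdrop] at h2
        exact h2.symm
      subst hrow
      have hleft : RepS (manh (i : Int) ((0 : Int) - 1)) (coneF grid (i : Int) ((0 : Int) - 1))
          none := by
        have : coneF grid (i : Int) ((0 : Int) - 1) = ∅ := cone_neg_col (by norm_num)
        rw [this]; exact rep_none_empty _
      have hprev' : ∀ (k : Nat), k < prev.length →
          RepS (manh ((i : Int) - 1) ((0 + k : Nat) : Int))
            (coneF grid ((i : Int) - 1) ((0 + k : Nat) : Int)) (prev.getD k none) := by
        intro k hk
        simpa only [Nat.zero_add] using hprev k (by omega)
      have hcur := fwRow_rep grid i hi prev 0 none hprev' hleft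
      have hcurlen : (fwRowB grid[i] (i : Int) (0 : Int) none prev).length = wdOf grid := by
        rw [fwRowB_length]; exact hlen
      set cur := fwRowB grid[i] (i : Int) ((0 : Nat) : Int) none prev with hcurdef
      have hcur' : ∀ k : Nat, k < wdOf grid →
          RepS (manh (((i + 1 : Nat) : Int) - 1) (k : Int))
            (coneF grid (((i + 1 : Nat) : Int) - 1) (k : Int)) (cur.getD k none) := by
        intro k hk
        have he : ((i + 1 : Nat) : Int) - 1 = (i : Int) := by push_cast; ring
        rw [he]
        simpa only [Nat.zero_add] using hcur k (by omega)
      have hihr := ih (i + 1) cur hrest' (by rw [hcurdef]; exact_mod_cast hcurlen) hcur'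
      have hexp : fwGridB (i : Int) prev (grid[i] :: rest')
          = cur :: fwGridB ((i : Int) + 1) cur rest' := rfl
      have hcast : ((i : Int) + 1) = ((i + 1 : Nat) : Int) := by push_cast; ring
      rw [hexp, hcast]
      refine ⟨by simpa using hihr.1, ?_⟩
      intro m hm
      match m with
      | 0 =>
          refine ⟨by simpa using hcurlen, ?_⟩
          intro k hk
          simpa only [Nat.add_zero, Nat.zero_add, List.getD_cons_zero] using hcur k (by omega)
      | Nat.succ m' =>
          have hm' : m' < rest'.length := by simpa using hm
          have := hihr.2 m' hm'
          have hcast2 : ((i + 1 + m' : Nat) : Int) = ((i + (m' + 1) : Nat) : Int) := by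
            push_cast; ring
          rw [hcast2] at this
          simpa only [List.getD_cons_succ] using this

-- one backward-sweep cell
theorem bw_cell (grid : List (List Int)) (r c : Int) {f nd ng : StB}
    {N M : Finset (Int × Int)}
    (hf : RepS (manh r c) (coneF grid r c) f)
    (hnd : RepS (manh (r + 1) c) N nd)
    (hng : RepS (manh r (c + 1)) M ng)
    (hN : N = posF grid ∨ (N = ∅ ∧ ∀ p ∈ posF grid, p.1 ≤ r))
    (hM : M = posF grid ∨ (M = ∅ ∧ ∀ p ∈ posF grid, p.2 ≤ c)) :
    RepS (manh r c) (posF grid) (mergeB (mergeB f (bumpB nd)) (bumpB ng)) := by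
  have h2 := repS_bump hnd
  have h3 := repS_bump hng
  have hsub1 : coneF grid r c ⊆ posF grid := Finset.filter_subset _ _
  have hsubN : N ⊆ posF grid := by
    rcases hN with rfl | ⟨rfl, _⟩
    · exact Finset.Subset.refl _
    · exact Finset.empty_subset _
  have hsubM : M ⊆ posF grid := by
    rcases hM with rfl | ⟨rfl, _⟩
    · exact Finset.Subset.refl _
    · exact Finset.empty_subset _
  have hmerge := repS_merge3 (κ := manh r c) hf h2 h3
    (fun p _ => le_refl _)
    (fun p _ => manh_down_le)
    (fun p _ => manh_right_le)
    (fun p hp => ?hat)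
  case hat =>
    have hpP : p ∈ posF grid := by
      rcases Finset.mem_union.mp hp with hp' | hp'
      · rcases Finset.mem_union.mp hp' with hp'' | hp''
        · exact hsub1 hp''
        · exact hsubN hp''
      · exact hsubM hp'
    by_cases h1 : p.1 ≤ r ∧ p.2 ≤ c
    · exact Or.inl ⟨Finset.mem_filter.mpr ⟨hpP, h1⟩, rfl⟩
    · by_cases hrow : r + 1 ≤ p.1
      · refine Or.inr (Or.inl ⟨?_, manh_down_eq hrow⟩)
        rcases hN with rfl | ⟨rfl, hle⟩
        · exact hpP
        · exact absurd (hle p hpP) (by omega)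
      · have hcol : c + 1 ≤ p.2 := by omega
        refine Or.inr (Or.inr ⟨?_, manh_right_eq hcol⟩)
        rcases hM with rfl | ⟨rfl, hle⟩
        · exact hpP
        · exact absurd (hle p hpP) (by omega)
  have hset : coneF grid r c ∪ N ∪ M = posF grid := by
    ext p
    simp only [Finset.mem_union]
    constructor
    · rintro ((hp | hp) | hp)
      · exact hsub1 hp
      · exact hsubN hp
      · exact hsubM hp
    · intro hpP
      by_cases h1 : p.1 ≤ r ∧ p.2 ≤ c
      · exact Or.inl (Or.inl (Finset.mem_filter.mpr ⟨hpP, h1⟩))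
      · by_cases hrow : r + 1 ≤ p.1
        · rcases hN with rfl | ⟨rfl, hle⟩
          · exact Or.inl (Or.inr hpP)
          · exact absurd (hle p hpP) (by omega)
        · rcases hM with rfl | ⟨rfl, hle⟩
          · exact Or.inr hpP
          · exact absurd (hle p hpP) (by omega)
  rwa [hset] at hmerge

theorem bwRowB_length : ∀ (frow nxt : List StB), (bwRowB frow nxt).length = frow.length := by
  intro frow
  induction frow with
  | nil => intro nxt; rfl
  | cons f fs ih => intro nxt; simp [bwRowB, ih]

theorem getD_tail_st (l : List StB) (k : Nat) : l.tail.getD k none = l.getD (k + 1) none := by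
  cases l <;> simp

theorem headD_st (l : List StB) : l.headD none = l.getD 0 none := by
  cases l <;> simp

theorem bwRow_rep (grid : List (List Int)) (r : Int) :
    ∀ (frow : List StB) (nxt : List StB) (j : Nat) (N : Finset (Int × Int)),
      (N = posF grid ∨ (N = ∅ ∧ ∀ p ∈ posF grid, p.1 ≤ r)) →
      j + frow.length = wdOf grid →
      (∀ k : Nat, k < frow.length →
        RepS (manh r ((j + k : Nat) : Int)) (coneF grid r ((j + k : Nat) : Int))
          (frow.getD k none)) →
      (∀ k : Nat, k < frow.length →
        RepS (manh (r + 1) ((j + k : Nat) : Int)) N (nxt.getD k none)) →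
      ∀ k : Nat, k < frow.length →
        RepS (manh r ((j + k : Nat) : Int)) (posF grid) ((bwRowB frow nxt).getD k none) := by
  intro frow
  induction frow with
  | nil => intro nxt j N _ _ _ _ k hk; exact absurd hk (by simp)
  | cons f fs ih =>
      intro nxt j N hN hend hf hn k hk
      have hexp : bwRowB (f :: fs) nxt
          = mergeB (mergeB f (bumpB (nxt.headD none)))
              (bumpB ((bwRowB fs nxt.tail).headD none)) :: bwRowB fs nxt.tail := rfl
      -- the element to the right
      have hright : ∃ M : Finset (Int × Int),
          (M = posF grid ∨ (M = ∅ ∧ ∀ p ∈ posF grid, p.2 ≤ ((j : Int)))) ∧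
          RepS (manh r ((j : Int) + 1)) M ((bwRowB fs nxt.tail).headD none) := by
        match fs, hend with
        | [], hend =>
            refine ⟨∅, Or.inr ⟨rfl, fun p hp => ?_⟩, rep_none_empty _⟩
            have hb := (posF_bounds hp).2.2.2.1
            have : j + 1 = wdOf grid := by simpa using hend
            omega
        | f2 :: fs2, hend =>
            have hf' : ∀ k : Nat, k < (f2 :: fs2).length →
                RepS (manh r (((j + 1) + k : Nat) : Int))
                  (coneF grid r (((j + 1) + k : Nat) : Int)) ((f2 :: fs2).getD k none) := by
              intro k2 hk2
              have := hf (k2 + 1) (by simpa using Nat.succ_lt_succ hk2)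
              simpa only [List.getD_cons_succ, show j + (k2 + 1) = j + 1 + k2 by omega] using this
            have hn' : ∀ k : Nat, k < (f2 :: fs2).length →
                RepS (manh (r + 1) (((j + 1) + k : Nat) : Int)) N (nxt.tail.getD k none) := by
              intro k2 hk2
              rw [getD_tail_st]
              have := hn (k2 + 1) (by simpa using Nat.succ_lt_succ hk2)
              simpa only [show j + (k2 + 1) = j + 1 + k2 by omega] using this
            have := ih nxt.tail (j + 1) N hN (by simp at hend ⊢; omega) hf' hn' 0 (by simp)
            rw [headD_st]
            refine ⟨posF grid, Or.inl rfl, ?_⟩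
            have hc : (((j + 1) + 0 : Nat) : Int) = (j : Int) + 1 := by push_cast; ring
            rwa [hc] at this
      obtain ⟨M, hM, hrightRep⟩ := hright
      match k with
      | 0 =>
          rw [hexp]
          simp only [Nat.add_zero, List.getD_cons_zero]
          have hf0 := hf 0 (by simp)
          simp only [Nat.add_zero, List.getD_cons_zero] at hf0
          have hn0 := hn 0 (by simp)
          simp only [Nat.add_zero] at hn0
          rw [headD_st nxt]
          exact bw_cell grid r (j : Int) hf0 hn0 hrightRep hN
            (by
              rcases hM with rfl | ⟨rfl, hp⟩
              · exact Or.inl rfl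
              · exact Or.inr ⟨rfl, hp⟩)
      | Nat.succ k' =>
          rw [hexp, List.getD_cons_succ]
          have hf' : ∀ k : Nat, k < fs.length →
              RepS (manh r (((j + 1) + k : Nat) : Int))
                (coneF grid r (((j + 1) + k : Nat) : Int)) (fs.getD k none) := by
            intro k2 hk2
            have := hf (k2 + 1) (by simpa using Nat.succ_lt_succ hk2)
            simpa only [List.getD_cons_succ, show j + (k2 + 1) = j + 1 + k2 by omega] using this
          have hn' : ∀ k : Nat, k < fs.length →
              RepS (manh (r + 1) (((j + 1) + k : Nat) : Int)) N (nxt.tail.getD k none) := by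
            intro k2 hk2
            rw [getD_tail_st]
            have := hn (k2 + 1) (by simpa using Nat.succ_lt_succ hk2)
            simpa only [show j + (k2 + 1) = j + 1 + k2 by omega] using this
          have := ih nxt.tail (j + 1) N hN (by simp at hend ⊢; omega) hf' hn' k'
            (by simpa using hk)
          simpa only [show j + 1 + k' = j + (k' + 1) by omega] using this

theorem bwGrid_length (Wd : Nat) : ∀ (frows : List (List StB)),
    (bwGridB Wd frows).length = frows.length := by
  intro frows
  induction frows with
  | nil => rfl
  | cons frow rest ih => simp [bwGridB, ih]

theorem bwGrid_rep (grid : List (List Int)) :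
    ∀ (frows : List (List StB)) (i : Nat),
      i + frows.length = grid.length →
      (∀ m : Nat, m < frows.length →
        ((frows.getD m []).length = wdOf grid ∧
         ∀ k : Nat, k < wdOf grid →
           RepS (manh ((i + m : Nat) : Int) (k : Int)) (coneF grid ((i + m : Nat) : Int) (k : Int))
             ((frows.getD m []).getD k none))) →
      ∀ m : Nat, m < frows.length →
        (((bwGridB (wdOf grid) frows).getD m []).length = wdOf grid ∧
         ∀ k : Nat, k < wdOf grid →
           RepS (manh ((i + m : Nat) : Int) (k : Int)) (posF grid)
             (((bwGridB (wdOf grid) frows).getD m []).getD k none)) := by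
  intro frows
  induction frows with
  | nil => intro i _ _ m hm; exact absurd hm (by simp)
  | cons frow rest ih =>
      intro i hlen hrows m hm
      have hexp : bwGridB (wdOf grid) (frow :: rest)
          = bwRowB frow ((bwGridB (wdOf grid) rest).headD (List.replicate (wdOf grid) none))
              :: bwGridB (wdOf grid) rest := rfl
      have hfrow := hrows 0 (by simp)
      simp only [Nat.add_zero, List.getD_cons_zero] at hfrow
      -- the row below
      have hbelow : ∃ N : Finset (Int × Int),
          (N = posF grid ∨ (N = ∅ ∧ ∀ p ∈ posF grid, p.1 ≤ ((i : Nat) : Int))) ∧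
          ∀ k : Nat, k < frow.length →
            RepS (manh (((i : Nat) : Int) + 1) ((0 + k : Nat) : Int)) N
              (((bwGridB (wdOf grid) rest).headD (List.replicate (wdOf grid) none)).getD k none) := by
        match rest, hlen with
        | [], hlen =>
            refine ⟨∅, Or.inr ⟨rfl, fun p hp => ?_⟩, fun k hk => ?_⟩
            · have hb := (posF_bounds hp).2.1
              have hlen' : i + 1 = grid.length := by simpa using hlen
              omega
            · have : (List.replicate (wdOf grid) none : List StB).getD k none = none := by
                rcases lt_or_ge k (wdOf grid) with h | h
                · rw [List.getD_eq_getElem?_getD, List.getElem?_eq_getElem (by simpa using h)]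
                  simp
                · rw [List.getD_eq_getElem?_getD, List.getElem?_eq_none (by simpa using h)]
                  rfl
              rw [show (bwGridB (wdOf grid) ([] : List (List StB))) = [] from rfl]
              simp only [List.headD_nil]
              rw [this]
              exact rep_none_empty _
        | frow2 :: rest2, hlen =>
            have hih := ih (i + 1) (by simp at hlen ⊢; omega) (fun m hm => by
              have := hrows (m + 1) (by simpa using Nat.succ_lt_succ hm)
              simpa only [List.getD_cons_succ,
                show i + (m + 1) = i + 1 + m by omega] using this) 0 (by simp)
            refine ⟨posF grid, Or.inl rfl, fun k hk => ?_⟩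
            have hklt : k < wdOf grid := by
              have := hfrow.1; omega
            have := hih.2 k hklt
            have hc : ((i + 1 + 0 : Nat) : Int) = ((i : Nat) : Int) + 1 := by push_cast; ring
            rw [hc] at this
            have hhead : (bwGridB (wdOf grid) (frow2 :: rest2)).headD
                (List.replicate (wdOf grid) none)
                = (bwGridB (wdOf grid) (frow2 :: rest2)).getD 0 [] := by
              rw [show bwGridB (wdOf grid) (frow2 :: rest2)
                = bwRowB frow2 ((bwGridB (wdOf grid) rest2).headD (List.replicate (wdOf grid) none))
                  :: bwGridB (wdOf grid) rest2 from rfl]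
              simp
            rw [hhead]
            simpa using this
      obtain ⟨N, hN, hnxt⟩ := hbelow
      have hfr : ∀ k : Nat, k < frow.length →
          RepS (manh ((i : Nat) : Int) ((0 + k : Nat) : Int))
            (coneF grid ((i : Nat) : Int) ((0 + k : Nat) : Int)) (frow.getD k none) := by
        intro k hk
        have := hfrow.2 k (by omega)
        simpa using this
      have hbw := bwRow_rep grid ((i : Nat) : Int) frow
        ((bwGridB (wdOf grid) rest).headD (List.replicate (wdOf grid) none)) 0 N hN
        (by simpa using hfrow.1) hfr hnxt
      match m with
      | 0 =>
          rw [hexp]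
          simp only [Nat.add_zero, List.getD_cons_zero]
          refine ⟨by rw [bwRowB_length]; exact hfrow.1, fun k hk => ?_⟩
          have := hbw k (by omega)
          simpa using this
      | Nat.succ m' =>
          rw [hexp, List.getD_cons_succ]
          have := ih (i + 1) (by simp at hlen ⊢; omega) (fun m2 hm2 => by
            have := hrows (m2 + 1) (by simpa using Nat.succ_lt_succ hm2)
            simpa only [List.getD_cons_succ,
              show i + (m2 + 1) = i + 1 + m2 by omega] using this) m' (by simpa using hm)
          simpa only [show i + 1 + m' = i + (m' + 1) by omega] using this

theorem posList_nodup (grid : List (List Int)) :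
    ((srcsOf grid).map (fun s => (s.1, s.2.1))).Nodup := by
  have hmap : (srcsOf grid).map (fun s => (s.1, s.2.1))
      = (PySem.List.enumerate grid).flatMap (fun p =>
          ((PySem.List.enumerate p.2).filter (fun q => decide (q.2 ≠ 0))).map
            (fun q => (p.1, q.1))) := by
    simp only [srcsOf, List.map_flatMap, List.map_map]
    rfl
  rw [hmap, List.nodup_flatMap]
  constructor
  · intro p _
    rw [List.nodup_iff_pairwise_ne, List.pairwise_map]
    exact (List.Pairwise.filter _ (PySem.List.pairwise_lt_enumerate p.2 0)).imp
      (fun hab => by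
        intro he
        have := congrArg Prod.snd he
        simp only at this
        omega)
  · refine (PySem.List.pairwise_lt_enumerate grid 0).imp (fun {a b} hab => ?_)
    intro x hxa hxb
    simp only [List.mem_map] at hxa hxb
    obtain ⟨qa, _, rfl⟩ := hxa
    obtain ⟨qb, _, hq⟩ := hxb
    have := congrArg Prod.fst hq
    simp only at this
    omega

-- counting matches over enumerate = counting matches in the list
theorem countP_enumerate (l : List Int) (m : Int) : ∀ s : Int,
    (PySem.List.enumerate l s).countP (fun p => decide (p.2 = m)) = l.count m := by
  induction l with
  | nil => intro s; simp
  | cons x t ih =>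
      intro s
      by_cases h : x = m <;>
        simp [PySem.List.enumerate_cons, ih (s + 1), h]

-- the first argmin index found through enumerate+filter points at find?'s element
theorem pick_first {α : Type} (g : α → Int) (m : Int) :
    ∀ (l : List α) (s : Int), m ∈ l.map g →
    ∃ j : Nat, j < l.length ∧
      ((((PySem.List.enumerate (l.map g) s).filter (fun p => decide (p.2 = m))).map Prod.fst).head?
        = some (s + (j : Int))) ∧
      l.find? (fun x => g x == m) = l[j]? := by
  intro l
  induction l with
  | nil => intro s h; simp at h
  | cons x t ih =>
      intro s h
      by_cases hx : g x = m
      · exact ⟨0, by simp, by simp [PySem.List.enumerate_cons, hx], by simp [hx]⟩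
      · have hm : m ∈ t.map g := by
          simp only [List.map_cons, List.mem_cons] at h
          exact h.resolve_left (fun hh => hx hh.symm)
        obtain ⟨j, hj, hhead, hfind⟩ := ih (s + 1) hm
        refine ⟨j + 1, by simpa using hj, ?_, ?_⟩
        · simp only [List.map_cons, PySem.List.enumerate_cons, List.filter_cons]
          have hdx : (decide ((g x) = m)) = false := by simp [hx]
          simp only [hdx, Bool.false_eq_true, if_false]
          rw [hhead]; congr 1; push_cast; ring
        · simp [hx, hfind]

-- card of an argset filter over posF = count over the source list
theorem card_filter_posF (grid : List (List Int)) (q : Int × Int → Prop)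
    [DecidablePred q] :
    ((posF grid).filter q).card = (srcsOf grid).countP (fun e => decide (q (e.1, e.2.1))) := by
  have h1 : ((posF grid).filter q)
      = (((srcsOf grid).map (fun s => (s.1, s.2.1))).filter (fun p => decide (q p))).toFinset := by
    rw [List.toFinset_filter]
    exact Finset.filter_congr (fun p _ => by simp)
  rw [h1, List.card_toFinset,
    List.Nodup.dedup (List.Nodup.filter _ (posList_nodup grid)),
    ← List.countP_eq_length_filter, List.countP_map]
  rfl

theorem cell_bridge (grid : List (List Int)) (r c : Int) (t : StB)
    (ht : RepS (manh r c) (posF grid) t) :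
    cellA (srcsOf grid) r c = emitB grid r c t := by
  cases hsrc : srcsOf grid with
  | nil =>
      have hP : posF grid = ∅ := by simp [posF, hsrc]
      cases t with
      | none => rfl
      | some q =>
          obtain ⟨d, sr, sc, u⟩ := q
          rw [hP] at ht
          exact absurd ht.2.1 (Finset.notMem_empty _)
  | cons x tail =>
      have hsrc' : srcsOf grid = x :: tail := hsrc
      rw [← hsrc]
      cases t with
      | none =>
          exfalso
          have hP : posF grid = ∅ := ht
          have : (x.1, x.2.1) ∈ posF grid := by
            rw [posF, List.mem_toFinset, hsrc]
            exact List.mem_map_of_mem (List.mem_cons_self ..)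
          rw [hP] at this
          exact absurd this (Finset.notMem_empty _)
      | some q =>
          obtain ⟨d, sr, sc, u⟩ := q
          obtain ⟨hbound, hmem, hkey, huniq⟩ := ht
          set s := srcsOf grid with hs
          set f : Int × Int × Int → Int := fun e => |r - e.1| + |c - e.2.1| with hf
          have hfm : ∀ e : Int × Int × Int, f e = manh r c (e.1, e.2.1) := fun e => rfl
          -- the minimum A computes
          have hmap : s.map f = f x :: tail.map f := by rw [hsrc']; rfl
          set m := (tail.map f).foldl min (f x) with hmdef
          have hmin? : PySem.List.min? (s.map f) (fun d => d) = some m := by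
            rw [hmap]; exact PySem.List.min?_id_cons ..
          have hm_le : ∀ y ∈ s.map f, m ≤ y := by
            intro y hy
            rw [hmap] at hy
            rcases List.mem_cons.mp hy with rfl | hy'
            · exact (PySem.List.foldl_min_le _ _).1
            · exact (PySem.List.foldl_min_le _ _).2 y hy'
          have hm_mem : m ∈ s.map f := by
            rw [hmap]
            rcases PySem.List.foldl_min_mem (tail.map f) (f x) with h | h
            · rw [hmdef, h]; exact List.mem_cons_self ..
            · exact List.mem_cons_of_mem _ h
          -- d = m
          have hdm : d = m := by
            obtain ⟨e, he, hfe⟩ := List.mem_map.mp hm_mem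
            have hpe : (e.1, e.2.1) ∈ posF grid := by
              rw [posF, List.mem_toFinset]
              exact List.mem_map_of_mem he
            have h1 : d ≤ m := by
              have := hbound _ hpe
              rw [← hfm e, hfe] at this
              exact this
            obtain ⟨e', he', hpe'⟩ := List.mem_map.mp (List.mem_toFinset.mp hmem)
            have h2 : m ≤ d := by
              have hin : f e' ∈ s.map f := List.mem_map_of_mem he'
              have := hm_le _ hin
              rwa [hfm e', hpe', hkey] at this
            omega
          -- A's nearest list
          have hnear : ((PySem.List.enumerate (s.map f)).foldl
              (fun acc p => if p.2 = m then acc ++ [p.1] else acc) [])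
              = ((PySem.List.enumerate (s.map f) 0).filter
                  (fun p => decide (p.2 = m))).map Prod.fst := by
            rw [PySem.List.foldl_append_ite (fun p : Int × Int => p.2 = m)
              (fun p : Int × Int => p.1)]
            simp
          have hlen : (((PySem.List.enumerate (s.map f) 0).filter
              (fun p => decide (p.2 = m))).map Prod.fst).length = (s.map f).count m := by
            rw [List.length_map, ← List.countP_eq_length_filter, countP_enumerate]
          have hcntP : (s.map f).count m
              = s.countP (fun e => decide (manh r c (e.1, e.2.1) = m)) := by
            rw [List.count_eq_countP, List.countP_map]
            refine List.countP_congr (fun e _ => ?_)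
            simp [Function.comp_apply, hfm e]
          have hcard : ((posF grid).filter (fun p => manh r c p = d)).card
              = (s.map f).count m := by
            rw [card_filter_posF grid, hcntP, hdm]
          -- unfold cellA far enough
          show (match PySem.List.min? (s.map f) (fun d => d) with
            | none => 0
            | some min_d =>
                let nearest := (PySem.List.enumerate (s.map f)).foldl
                  (fun acc p => if p.2 = min_d then acc ++ [p.1] else acc) []
                if nearest.length ≠ 1 then 0
                else
                  let e := PySem.List.pyGetD s (PySem.List.pyGetD nearest 0 0) (0, 0, 0)
                  if PySem.Int.mod (max |r - e.1| |c - e.2.1|) 2 = 0 then e.2.2 else 0)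
            = emitB grid r c (some (d, sr, sc, u))
          rw [hmin?]
          simp only [hnear]
          by_cases hone : (s.map f).count m = 1
          · -- unique nearest source
            have hu : u = true := huniq.mpr (by rw [hcard]; exact hone)
            subst hu
            rw [if_neg (by rw [hlen]; omega)]
            obtain ⟨j, hj, hhead, hfind⟩ := pick_first f m s 0 hm_mem
            have hidx : PySem.List.pyGetD (((PySem.List.enumerate (s.map f) 0).filter
                (fun p => decide (p.2 = m))).map Prod.fst) 0 0 = (j : Int) := by
              rw [PySem.List.pyGetD_zero, List.getD_eq_getElem?_getD,
                ← List.head?_eq_getElem?, hhead]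
              simp
            rw [hidx]
            have hA : PySem.List.pyGetD s ((j : Nat) : Int) (0, 0, 0) = s[j] := by
              rw [PySem.List.pyGetD_natCast, List.getD_eq_getElem?_getD,
                List.getElem?_eq_getElem hj]
              rfl
            rw [hA]
            have hsel : s.find? (fun e => f e == m) = some s[j] :=
              hfind.trans (List.getElem?_eq_getElem hj)
            have hfe : f s[j] = m := by
              have := List.find?_some hsel
              simpa using this
            -- both chosen positions lie in the singleton argmin set
            have hmem1 : (s[j].1, s[j].2.1) ∈ (posF grid).filter (fun p => manh r c p = d) := by
              refine Finset.mem_filter.mpr ⟨?_, ?_⟩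
              · rw [posF, List.mem_toFinset]
                exact List.mem_map_of_mem (List.getElem_mem hj)
              · rw [← hfm, hfe, hdm]
            have hmem2 : (sr, sc) ∈ (posF grid).filter (fun p => manh r c p = d) :=
              Finset.mem_filter.mpr ⟨hmem, hkey⟩
            have hcard1 : ((posF grid).filter (fun p => manh r c p = d)).card = 1 := by
              rw [hcard]; exact hone
            obtain ⟨a, ha⟩ := Finset.card_eq_one.mp hcard1
            rw [ha] at hmem1 hmem2
            have hpos : (s[j].1, s[j].2.1) = (sr, sc) :=
              (Finset.mem_singleton.mp hmem1).trans (Finset.mem_singleton.mp hmem2).symm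
            have hsr : s[j].1 = sr := congrArg Prod.fst hpos
            have hsc : s[j].2.1 = sc := congrArg Prod.snd hpos
            -- the value A reads equals the value B looks up
            obtain ⟨i2, j2, hi2, hj2, hne2, he2⟩ :=
              mem_srcsOf.mp (show s[j] ∈ srcsOf grid from List.getElem_mem hj)
            have houter : PySem.List.pyGetD grid ((i2 : Nat) : Int) [] = grid[i2] := by
              rw [PySem.List.pyGetD_natCast, List.getD_eq_getElem?_getD,
                List.getElem?_eq_getElem hi2]
              rfl
            have hinner : PySem.List.pyGetD grid[i2] ((j2 : Nat) : Int) 0 = grid[i2][j2] := by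
              rw [PySem.List.pyGetD_natCast, List.getD_eq_getElem?_getD,
                List.getElem?_eq_getElem hj2]
              rfl
            have hval : PySem.List.pyGetD (PySem.List.pyGetD grid sr []) sc 0 = s[j].2.2 := by
              rw [← hsr, ← hsc, he2]
              simp only
              rw [houter, hinner]
            show (if PySem.Int.mod (max |r - s[j].1| |c - s[j].2.1|) 2 = 0
                then s[j].2.2 else 0)
              = (if PySem.Int.mod (max |r - sr| |c - sc|) 2 = 0
                then PySem.List.pyGetD (PySem.List.pyGetD grid sr []) sc 0 else 0)
            rw [hsr, hsc, hval]
          · -- tied or no unique nearest source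
            have hu : u = false := by
              cases hu' : u
              · rfl
              · exact absurd (by rw [← hcard]; exact huniq.mp hu') hone
            subst hu
            rw [if_pos (by rw [hlen]; omega)]
            rfl

theorem getD_replicate_none (n k : Nat) :
    (List.replicate n (none : StB)).getD k none = none := by
  rcases lt_or_ge k n with h | h
  · rw [List.getD_eq_getElem?_getD, List.getElem?_eq_getElem (by simpa using h)]
    simp
  · rw [List.getD_eq_getElem?_getD, List.getElem?_eq_none (by simpa using h)]
    rfl

-- A's source-collection loop builds the flatMap comprehension
theorem sources_eq (grid : List (List Int)) :
    (PySem.List.enumerate grid).foldl (fun acc p =>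
        (PySem.List.enumerate p.2).foldl (fun acc q =>
          if q.2 ≠ 0 then acc ++ [(p.1, q.1, q.2)] else acc) acc) []
    = srcsOf grid := by
  have h : (fun (acc : List (Int × Int × Int)) (p : Int × List Int) =>
        (PySem.List.enumerate p.2).foldl (fun acc q =>
          if q.2 ≠ 0 then acc ++ [(p.1, q.1, q.2)] else acc) acc)
      = (fun (acc : List (Int × Int × Int)) (p : Int × List Int) =>
        acc ++ ((PySem.List.enumerate p.2).filter (fun q => decide (q.2 ≠ 0))).map
          (fun q => (p.1, q.1, q.2))) := by
    funext acc p
    exact PySem.List.foldl_append_ite (fun (q : Int × Int) => q.2 ≠ 0)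
      (fun (q : Int × Int) => (p.1, q.1, q.2)) _ acc
  rw [h, PySem.List.foldl_append_eq_flatMap]
  simp [srcsOf]

theorem transform_eq (grid : List (List Int)) : transform grid = transform_alt grid := by
  rcases Nat.eq_zero_or_pos grid.length with hn | hn
  · have : grid = [] := List.length_eq_zero_iff.mp hn
    subst this
    decide
  -- structural facts about the forward and backward sweeps
  have hprev0 : ∀ k : Nat, k < wdOf grid →
      RepS (manh (((0 : Nat) : Int) - 1) (k : Int)) (coneF grid (((0 : Nat) : Int) - 1) (k : Int))
        ((List.replicate (wdOf grid) (none : StB)).getD k none) := by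
    intro k hk
    rw [getD_replicate_none, cone_neg_row (by norm_num)]
    exact rep_none_empty _
  have hfw := fwGrid_rep grid grid 0 (List.replicate (wdOf grid) none) rfl
    (List.length_replicate) hprev0
  have hst := bwGrid_rep grid (fwGridB ((0 : Nat) : Int) (List.replicate (wdOf grid) none) grid) 0
    (by rw [hfw.1]; omega) (fun m hm => hfw.2 m (by omega))
  simp only [Nat.cast_zero, Nat.zero_add] at hfw hst
  have hfwlen : (fwGridB 0 (List.replicate (wdOf grid) none) grid).length = grid.length := hfw.1
  have hstlen : (bwGridB (wdOf grid) (fwGridB 0 (List.replicate (wdOf grid) none) grid)).length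
      = grid.length := by rw [bwGrid_length, hfwlen]
  -- the widths
  set w : Nat := (grid.getD 0 []).length with hw
  have hW : (if (PySem.List.len grid) ≠ 0 then PySem.List.len (PySem.List.pyGetD grid 0 []) else 0)
      = ((w : Nat) : Int) := by
    rw [if_pos (by rw [PySem.List.len_eq]; exact_mod_cast Nat.pos_iff_ne_zero.mp hn),
      PySem.List.pyGetD_zero, PySem.List.len_eq]
  have hwle : w ≤ wdOf grid := by
    rw [hw]
    have h0 : grid.getD 0 [] = grid[0]'(by omega) := by
      rw [List.getD_eq_getElem?_getD, List.getElem?_eq_getElem (by omega)]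
      rfl
    rw [h0]
    exact le_wdOf (List.getElem_mem _)
  rw [transform, transform_alt, sources_eq, hW, PySem.List.len_eq,
    show grid.foldl (fun acc row => if row.length > acc then row.length else acc) 0 = wdOf grid
      from rfl]
  simp only [PySem.List.pyRange_zero_natCast]
  apply List.ext_getElem
  · simp [hstlen, PySem.List.length_enumerate]
  intro i h1 h2
  have hi : i < grid.length := by simpa using h1
  simp only [List.getElem_map, List.getElem_range]
  rw [PySem.List.getElem_enumerate]
  simp only [zero_add]
  -- the st row
  have hstrow := hst i (by rwa [hfwlen])
  have hrowlen : ((bwGridB (wdOf grid) (fwGridB 0 (List.replicate (wdOf grid) none) grid)).getD i []).length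
      = wdOf grid := hstrow.1
  have hrowget : (bwGridB (wdOf grid) (fwGridB 0 (List.replicate (wdOf grid) none) grid)).getD i []
      = (bwGridB (wdOf grid) (fwGridB 0 (List.replicate (wdOf grid) none) grid))[i]'(by
          rwa [hstlen]) := by
    rw [List.getD_eq_getElem?_getD, List.getElem?_eq_getElem (by rwa [hstlen])]
    rfl
  rw [PySem.List.slice_to_natCast]
  apply List.ext_getElem
  · simp only [List.length_map, List.length_range, PySem.List.length_enumerate,
      List.length_take]
    rw [← hrowget, hrowlen]
    omega
  intro j hj1 hj2
  have hjw : j < w := by simpa using hj1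
  simp only [List.getElem_map, List.getElem_range]
  rw [PySem.List.getElem_enumerate]
  simp only [zero_add, List.getElem_take]
  -- per-cell equality via the summary invariant
  have hrep := hstrow.2 j (by omega)
  rw [hrowget] at hrep
  have hcell : ((bwGridB (wdOf grid) (fwGridB 0 (List.replicate (wdOf grid) none) grid))[i]'(by
      rwa [hstlen])).getD j none
      = ((bwGridB (wdOf grid) (fwGridB 0 (List.replicate (wdOf grid) none) grid))[i]'(by
      rwa [hstlen]))[j]'(by rw [← hrowget, hrowlen]; omega) := by
    rw [List.getD_eq_getElem?_getD, List.getElem?_eq_getElem (by rw [← hrowget, hrowlen]; omega)]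
    rfl
  rw [hcell] at hrep
  exact cell_bridge grid (i : Int) (j : Int) _ hrep

-- ===== VERDICT (by name: the statement is the Claim_ definition above) =====
theorem transform_spec : Claim_equal_transform := by
  intro grid _ _
  unfold Spec_transform
  exact transform_eq grid
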